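-- pv_equiv track=rewrite | github.com/kippchenburger/AOC | AOC15/AOC15_5_nicenaughty.py | checkcombos
-- ===== SOURCE A (Python) =====
-- def checkcombos (string_to_check_combos):
--     s = string_to_check_combos
--     nice_combo = True
--     for i in range(len(s)-1):
--         if s[i] == "a" and s[i+1] == "b":
--             nice_combo = False
--             break
--         elif s[i] == "c" and s[i+1] == "d":
--             nice_combo = False
--             break
--         elif s[i] == "p" and s[i+1] == "q":
--             nice_combo = False
--             break
--         elif s[i] == "x" and s[i+1] == "y":
--             nice_combo = False
--             break
--     return nice_combo
-- ===== SOURCE B (Python) =====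
-- def checkcombos(string_to_check_combos):
--     return not any(bg in string_to_check_combos for bg in ("ab", "cd", "pq", "xy"))
-- ===== Notes on version B (the rewrite author's own statement) =====
-- stated objective: idiomatic
-- what changed: Replaces the positional index loop with early break by four substring-membership scans combined with any(), returning not-any over the forbidden bigrams.
import Mathlib
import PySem

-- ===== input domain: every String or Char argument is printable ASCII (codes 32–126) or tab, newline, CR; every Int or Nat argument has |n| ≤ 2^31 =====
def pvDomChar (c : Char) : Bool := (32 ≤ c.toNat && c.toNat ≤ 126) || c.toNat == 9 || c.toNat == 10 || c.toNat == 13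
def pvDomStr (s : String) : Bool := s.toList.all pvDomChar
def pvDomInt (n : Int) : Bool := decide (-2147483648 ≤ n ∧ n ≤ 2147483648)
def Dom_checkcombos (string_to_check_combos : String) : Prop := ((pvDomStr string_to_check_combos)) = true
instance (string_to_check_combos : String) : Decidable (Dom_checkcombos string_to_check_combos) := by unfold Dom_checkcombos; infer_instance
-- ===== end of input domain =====

-- ===== PORT A =====
-- one line: B tests the four forbidden bigrams with substring membership instead of A's indexed loop (idiomatic, same cost)
-- the index loop 'for i in range(len(s)-1)' with break, scanning adjacent pairs in A's branch order
def checkcombosGo : List Char → Bool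
  | a :: b :: rest =>
      if a = 'a' ∧ b = 'b' then false
      else if a = 'c' ∧ b = 'd' then false
      else if a = 'p' ∧ b = 'q' then false
      else if a = 'x' ∧ b = 'y' then false
      else checkcombosGo (b :: rest)
  | _ => true

def checkcombos (string_to_check_combos : String) : Bool :=
  checkcombosGo string_to_check_combos.toList

-- ===== PORT B =====
def checkcombos_alt (string_to_check_combos : String) : Bool :=
  !(["ab", "cd", "pq", "xy"].any (fun bg => PySem.Str.isIn bg string_to_check_combos))

-- ===== PRECONDITION & SPEC =====
def Spec_checkcombos (string_to_check_combos : String) (out : Bool) : Prop := out = checkcombos_alt string_to_check_combos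
instance (string_to_check_combos : String) (out : Bool) : Decidable (Spec_checkcombos string_to_check_combos out) := by unfold Spec_checkcombos; infer_instance

-- ===== CLAIM (what is proved, stated in full; the proofs are below) =====
def Claim_equal_checkcombos : Prop := ∀ (string_to_check_combos : String), Dom_checkcombos string_to_check_combos → Spec_checkcombos string_to_check_combos (checkcombos string_to_check_combos)

-- ===== LEMMAS AND PROOFS =====
def checkcombosBad (l : List Char) : Prop :=
  ['a','b'] <:+: l ∨ ['c','d'] <:+: l ∨ ['p','q'] <:+: l ∨ ['x','y'] <:+: l

theorem checkcombosBad_short {l : List Char} (h : l.length < 2) : ¬ checkcombosBad l := by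
  rintro (hi | hi | hi | hi) <;> · have := hi.length_le; simp at this; omega

theorem two_infix_cons_cons (x y a b : Char) (rest : List Char) :
    [x, y] <:+: (a :: b :: rest) ↔ (x = a ∧ y = b) ∨ [x, y] <:+: (b :: rest) := by
  constructor
  · rintro ⟨s, t, he⟩
    cases s with
    | nil =>
      simp only [List.nil_append, List.cons_append, List.cons.injEq] at he
      exact Or.inl ⟨he.1, he.2.1⟩
    | cons s0 s' =>
      simp only [List.cons_append, List.cons.injEq] at he
      exact Or.inr ⟨s', t, he.2⟩
  · rintro (⟨rfl, rfl⟩ | h)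
    · exact ⟨[], rest, rfl⟩
    · obtain ⟨s, t, he⟩ := h
      exact ⟨a :: s, t, by simp [he]⟩

theorem checkcombosBad_cons_cons (a b : Char) (rest : List Char) :
    checkcombosBad (a :: b :: rest) ↔
      ((a = 'a' ∧ b = 'b') ∨ (a = 'c' ∧ b = 'd') ∨ (a = 'p' ∧ b = 'q') ∨ (a = 'x' ∧ b = 'y')) ∨
      checkcombosBad (b :: rest) := by
  simp only [checkcombosBad, two_infix_cons_cons]
  constructor
  · rintro (h | h | h | h) <;> rcases h with ⟨rfl, rfl⟩ | h <;> tauto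
  · rintro (h | h) <;> tauto

theorem checkcombosGo_eq_true_iff (l : List Char) :
    checkcombosGo l = true ↔ ¬ checkcombosBad l := by
  induction l using checkcombosGo.induct with
  | case1 a b rest h1 =>
    obtain ⟨rfl, rfl⟩ := h1
    simp [checkcombosGo, checkcombosBad_cons_cons]
  | case2 a b rest h1 h2 =>
    obtain ⟨rfl, rfl⟩ := h2
    simp [checkcombosGo, checkcombosBad_cons_cons]
  | case3 a b rest h1 h2 h3 =>
    obtain ⟨rfl, rfl⟩ := h3
    simp [checkcombosGo, checkcombosBad_cons_cons]
  | case4 a b rest h1 h2 h3 h4 =>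
    obtain ⟨rfl, rfl⟩ := h4
    simp [checkcombosGo, checkcombosBad_cons_cons]
  | case5 a b rest h1 h2 h3 h4 ih =>
    rw [checkcombosGo, if_neg h1, if_neg h2, if_neg h3, if_neg h4, ih,
      checkcombosBad_cons_cons]
    tauto
  | case6 l h =>
    have hlen : l.length < 2 := by
      match l, h with
      | [], _ => simp
      | [_], _ => simp
      | a :: b :: r, h => exact absurd rfl (h a b r)
    simp only [checkcombosGo, true_iff]
    exact checkcombosBad_short hlen

theorem checkcombos_alt_eq_true_iff (s : String) :
    checkcombos_alt s = true ↔ ¬ checkcombosBad s.toList := by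
  have h : ∀ sub : List Char, (PySem.Chars.isIn sub s.toList = false) ↔ ¬ sub <:+: s.toList := by
    intro sub
    rw [← PySem.Chars.isIn_iff_infix sub s.toList, Bool.not_eq_true]
  have hab : ("ab" : String).toList = ['a','b'] := rfl
  have hcd : ("cd" : String).toList = ['c','d'] := rfl
  have hpq : ("pq" : String).toList = ['p','q'] := rfl
  have hxy : ("xy" : String).toList = ['x','y'] := rfl
  simp only [checkcombos_alt, Bool.not_eq_eq_eq_not, Bool.not_true, List.any_cons,
    List.any_nil, Bool.or_eq_false_iff, PySem.Str.isIn_eq, hab, hcd, hpq, hxy, h,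
    checkcombosBad, and_true]
  tauto

-- ===== VERDICT (by name: the statement is the Claim_ definition above) =====
theorem checkcombos_spec : Claim_equal_checkcombos := by
  intro s _
  unfold Spec_checkcombos
  rw [Bool.eq_iff_iff]
  rw [checkcombos, checkcombosGo_eq_true_iff, checkcombos_alt_eq_true_iff]
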